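-- pv_equiv track=rewrite | github.com/buzgalbraith/DNA-Mapping-Algorithms | src/naive_bwa.py | get_all_ranks
-- ===== SOURCE A (Python) =====
-- def get_all_ranks(bwt_ref, letters=None):
--     if letters is None:
--         letters = set(bwt_ref)
--
--     result = {letter:[0] for letter in letters}
--     result[bwt_ref[0]] = [1]
--     for letter in bwt_ref[1:]:
--         for i, j in result.items():
--             j.append(j[-1] + (i == letter))
--     return(result)
-- ===== SOURCE B (Python) =====
-- def get_all_ranks(bwt_ref, letters=None):
--     # Letter-major: one fresh scan of bwt_ref per key with a single running counter,
--     # instead of growing every list in lockstep position by position.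
--     if letters is None:
--         letters = set(bwt_ref)
--     keys = list(dict.fromkeys(letters))
--     first = bwt_ref[0]
--     if first not in keys:
--         keys.append(first)
--     result = {}
--     for key in keys:
--         count = 1 if key == first else 0
--         ranks = [count]
--         for ch in bwt_ref[1:]:
--             count += (ch == key)
--             ranks.append(count)
--         result[key] = ranks
--     return result
-- ===== Notes on version B (the rewrite author's own statement) =====
-- stated objective: alternative
-- what changed: Replaces A's position-major pass that grows every letter's list in lockstep (and its dict comprehension) with a letter-major loop: the key list is built once (dedup + bwt_ref[0]) and each key gets its cumulative-rank list from its own scan of bwt_ref with a single running counter.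
import Mathlib
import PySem

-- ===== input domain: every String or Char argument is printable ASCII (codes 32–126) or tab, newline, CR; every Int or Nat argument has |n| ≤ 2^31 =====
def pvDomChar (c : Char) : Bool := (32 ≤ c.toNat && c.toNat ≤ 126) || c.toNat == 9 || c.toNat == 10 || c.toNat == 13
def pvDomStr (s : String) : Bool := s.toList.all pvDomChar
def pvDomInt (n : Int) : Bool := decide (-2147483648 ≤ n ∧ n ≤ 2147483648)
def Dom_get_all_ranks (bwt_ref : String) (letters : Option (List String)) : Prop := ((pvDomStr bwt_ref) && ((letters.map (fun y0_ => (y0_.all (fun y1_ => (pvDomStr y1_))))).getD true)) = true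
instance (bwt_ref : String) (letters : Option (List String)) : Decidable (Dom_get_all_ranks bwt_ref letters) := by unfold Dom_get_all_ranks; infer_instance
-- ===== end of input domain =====

-- B replaces A's position-major lockstep growth of all rank lists by a letter-major
-- loop (one running counter and one scan of bwt_ref per key); same cost, different decomposition.


-- ===== PORT A =====
-- str(c) for one character (iterating a Python str yields length-1 strings)
def pyStrOfChar (c : Char) : String := String.mk [c]

-- Literal port of A. 'letters = set(bwt_ref)'; 'result = {letter:[0] for letter in letters}';
-- 'result[bwt_ref[0]] = [1]' (IndexError on "" — excluded by Pre_; we return [] there);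
-- then for each letter of bwt_ref[1:], every value list j gets j[-1] + (i == letter) appended
-- (j is never empty, so j[-1] is exactly j.getLastD 0).
def get_all_ranks (bwt_ref : String) (letters : Option (List String)) : List (String × List Int) :=
  let lettersL : List String :=
    match letters with
    | none => PySem.Set.ofList (bwt_ref.toList.map pyStrOfChar)
    | some ls => ls
  let result : PySem.Dict String (List Int) :=
    lettersL.foldl (fun d letter => d.insert letter [0]) PySem.Dict.empty
  match bwt_ref.toList with
  | [] => []
  | c0 :: rest =>
    let result := result.insert (pyStrOfChar c0) [1]
    let result := rest.foldl
      (fun d letter =>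
        PySem.Dict.mk (d.items.map (fun p =>
          (p.1, p.2 ++ [p.2.getLastD 0 + (if p.1 = pyStrOfChar letter then 1 else 0)]))))
      result
    result.items

-- ===== PORT B =====
-- Literal port of Source B. keys = list(dict.fromkeys(letters)); append bwt_ref[0] if missing
-- (bwt_ref[0]: IndexError on "" — excluded by Pre_; we return [] there); then per key one
-- scan of bwt_ref[1:] with a running counter; result[key] = ranks appends (keys are distinct).
def get_all_ranks_alt (bwt_ref : String) (letters : Option (List String)) : List (String × List Int) :=
  let lettersL : List String :=
    match letters with
    | none => PySem.Set.ofList (bwt_ref.toList.map pyStrOfChar)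
    | some ls => ls
  let keys0 : List String := PySem.List.dedup lettersL
  match bwt_ref.toList with
  | [] => []
  | c0 :: rest =>
    let first := pyStrOfChar c0
    let keys := if first ∈ keys0 then keys0 else keys0 ++ [first]
    keys.foldl
      (fun res key =>
        let init : Int := if key = first then 1 else 0
        let st := rest.foldl
          (fun (st : Int × List Int) ch =>
            let c := st.1 + (if pyStrOfChar ch = key then 1 else 0)
            (c, st.2 ++ [c]))
          (init, [init])
        res ++ [(key, st.2)])
      []

-- ===== PRECONDITION & SPEC =====
-- A evaluates bwt_ref[0], which raises IndexError exactly when bwt_ref is empty.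
def Pre_get_all_ranks (bwt_ref : String) (letters : Option (List String)) : Prop := bwt_ref ≠ ""
instance (bwt_ref : String) (letters : Option (List String)) : Decidable (Pre_get_all_ranks bwt_ref letters) := by unfold Pre_get_all_ranks; infer_instance
def pvWitness_get_all_ranks : String × Option (List String) := ("aba$", some ["a", "b"])

def Spec_get_all_ranks (bwt_ref : String) (letters : Option (List String)) (out : List (String × List Int)) : Prop := out = get_all_ranks_alt bwt_ref letters
instance (bwt_ref : String) (letters : Option (List String)) (out : List (String × List Int)) : Decidable (Spec_get_all_ranks bwt_ref letters out) := by unfold Spec_get_all_ranks; infer_instance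

-- ===== CLAIM (what is proved, stated in full; the proofs are below) =====
def Claim_equal_get_all_ranks : Prop := ∀ (bwt_ref : String) (letters : Option (List String)), Dom_get_all_ranks bwt_ref letters → Pre_get_all_ranks bwt_ref letters → Spec_get_all_ranks bwt_ref letters (get_all_ranks bwt_ref letters)

-- ===== LEMMAS AND PROOFS =====

-- A's initial comprehension: inserting the constant value [0] for every letter yields
-- exactly the deduplicated key list, each paired with [0].
lemma items_foldl_insert_const (l : List String) (d : PySem.Dict String (List Int))
    (v : List Int) (hinv : d.items = d.keys.map (fun k => (k, v))) (hnd : d.keys.Nodup) :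
    (l.foldl (fun d k => d.insert k v) d).items
      = (PySem.Set.update d.keys l).map (fun k => (k, v)) := by
  induction l generalizing d with
  | nil => simpa [PySem.Set.update] using hinv
  | cons x t ih =>
    simp only [List.foldl_cons]
    rw [ih (d.insert x v) ?_ (PySem.Dict.nodup_keys_insert d x v hnd)]
    · have hk : (d.insert x v).keys = PySem.Set.add d.keys x := by
        by_cases hc : d.contains x = true
        · rw [PySem.Dict.keys_insert_of_contains d v hc]
          simp [PySem.Set.add, PySem.Set.contains,
            (PySem.Dict.contains_iff_mem_keys d x).mp hc]
        · rw [PySem.Dict.keys_insert_of_not_contains d v (by simpa using hc)]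
          have : ¬ x ∈ d.keys := fun hm => hc ((PySem.Dict.contains_iff_mem_keys d x).mpr hm)
          simp [PySem.Set.add, PySem.Set.contains, this]
      rw [hk]
      simp [PySem.Set.update]
    · by_cases hc : d.contains x = true
      · rw [PySem.Dict.items_insert_of_contains d v hc,
          PySem.Dict.keys_insert_of_contains d v hc, hinv, List.map_map]
        apply List.map_congr_left
        intro k _
        by_cases hkx : k = x <;> simp [hkx]
      · rw [PySem.Dict.items_insert_of_not_contains d v (by simpa using hc),
          PySem.Dict.keys_insert_of_not_contains d v (by simpa using hc), hinv]
        simp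

-- A's tail loop rewrites the whole items list each step; expose it as a fold on the items list.
lemma items_foldl_mapDict (rest : List Char) (d : PySem.Dict String (List Int))
    (g : Char → String × List Int → String × List Int) :
    (rest.foldl (fun d ch => PySem.Dict.mk (d.items.map (g ch))) d).items
      = rest.foldl (fun its ch => its.map (g ch)) d.items := by
  induction rest generalizing d with
  | nil => rfl
  | cons x t ih => simp [List.foldl_cons, ih]

-- Loop interchange: a fold whose step maps every list entry independently is the map
-- of the per-entry fold (position-major pass = letter-major passes).
lemma foldl_map_swap (rest : List Char) (its : List (String × List Int))
    (g : Char → String × List Int → String × List Int) :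
    rest.foldl (fun its ch => its.map (g ch)) its
      = its.map (fun p => rest.foldl (fun p ch => g ch p) p) := by
  induction rest generalizing its with
  | nil => simp
  | cons x t ih =>
    simp only [List.foldl_cons, ih, List.map_map]
    rfl

-- Per key: A's append-last-plus-indicator fold equals the second component of B's
-- running-counter fold, whenever the counter equals the last list entry.
lemma per_key_fold (rest : List Char) (k : String) :
    ∀ (cnt : Int) (ranks : List Int), ranks.getLastD 0 = cnt →
    rest.foldl (fun (p : String × List Int) ch =>
        (p.1, p.2 ++ [p.2.getLastD 0 + (if p.1 = pyStrOfChar ch then 1 else 0)])) (k, ranks)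
      = (k, (rest.foldl (fun (st : Int × List Int) ch =>
            (st.1 + (if pyStrOfChar ch = k then 1 else 0),
             st.2 ++ [st.1 + (if pyStrOfChar ch = k then 1 else 0)])) (cnt, ranks)).2) := by
  induction rest with
  | nil => intro cnt ranks h; simp
  | cons x t ih =>
    intro cnt ranks h
    simp only [List.foldl_cons, h]
    have hcomm : (if k = pyStrOfChar x then (1 : Int) else 0)
        = (if pyStrOfChar x = k then (1 : Int) else 0) := by
      by_cases hkx : k = pyStrOfChar x <;> simp [hkx, Ne.symm]
    rw [hcomm]
    exact ih (cnt + (if pyStrOfChar x = k then 1 else 0))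
      (ranks ++ [cnt + (if pyStrOfChar x = k then 1 else 0)]) (by simp)

lemma dedup_eq_ofList (l : List String) : PySem.List.dedup l = PySem.Set.ofList l := by
  rfl

-- Main body equality once bwt_ref = c0 :: rest is exposed.
lemma main_eq (lettersL : List String) (c0 : Char) (rest : List Char) :
    ((rest.foldl
        (fun d letter =>
          PySem.Dict.mk (d.items.map (fun p =>
            (p.1, p.2 ++ [p.2.getLastD 0 + (if p.1 = pyStrOfChar letter then 1 else 0)]))))
        ((lettersL.foldl (fun d letter => d.insert letter [0]) PySem.Dict.empty).insert
          (pyStrOfChar c0) [1])).items)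
    = ((if pyStrOfChar c0 ∈ PySem.List.dedup lettersL then PySem.List.dedup lettersL
        else PySem.List.dedup lettersL ++ [pyStrOfChar c0]).foldl
        (fun res key =>
          res ++ [(key,
            (rest.foldl
              (fun (st : Int × List Int) ch =>
                (st.1 + (if pyStrOfChar ch = key then 1 else 0),
                 st.2 ++ [st.1 + (if pyStrOfChar ch = key then 1 else 0)]))
              ((if key = pyStrOfChar c0 then 1 else 0),
               [if key = pyStrOfChar c0 then 1 else 0])).2)])
        []) := by
  set first := pyStrOfChar c0 with hfirst
  set keys0 : List String := PySem.List.dedup lettersL with hkeys0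
  set keys : List String := if first ∈ keys0 then keys0 else keys0 ++ [first] with hkeys
  set d0 : PySem.Dict String (List Int) :=
    lettersL.foldl (fun d letter => d.insert letter [0]) PySem.Dict.empty with hd0
  have h0 : d0.items = keys0.map (fun k => (k, ([0] : List Int))) := by
    rw [hd0, items_foldl_insert_const lettersL PySem.Dict.empty [0] (by rfl)
      (PySem.Dict.nodup_keys_empty)]
    rfl
  have hnd : keys0.Nodup := by rw [hkeys0, dedup_eq_ofList]; exact PySem.Set.nodup_ofList _
  have hk0 : d0.keys = keys0 := by
    show d0.items.map (·.1) = keys0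
    rw [h0, List.map_map]
    exact List.map_id'' (congrFun rfl) keys0
  have hcont : d0.contains first = decide (first ∈ keys0) := by
    rw [PySem.Dict.contains_eq_decide_mem_keys, hk0]
  have h1 : (d0.insert first [1]).items
      = keys.map (fun k => (k, if k = first then ([1] : List Int) else [0])) := by
    by_cases hmem : first ∈ keys0
    · have hc : d0.contains first = true := by rw [hcont]; simpa using hmem
      rw [PySem.Dict.items_insert_of_contains d0 [1] hc, h0, List.map_map, hkeys]
      simp only [hmem, if_pos]
      apply List.map_congr_left
      intro k _
      by_cases hkf : k = first <;> simp [hkf]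
    · have hc : d0.contains first = false := by rw [hcont]; simpa using hmem
      rw [PySem.Dict.items_insert_of_not_contains d0 [1] hc, h0, hkeys]
      rw [if_neg hmem, List.map_append]
      congr 1
      · apply List.map_congr_left
        intro k hkm
        have : k ≠ first := fun h => hmem (h ▸ hkm)
        simp [this]
      · simp
  rw [items_foldl_mapDict, foldl_map_swap, h1, List.map_map]
  rw [PySem.List.foldl_append_singleton_eq_map
    (f := fun key => (key,
      (rest.foldl
        (fun (st : Int × List Int) ch =>
          (st.1 + (if pyStrOfChar ch = key then 1 else 0),
           st.2 ++ [st.1 + (if pyStrOfChar ch = key then 1 else 0)]))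
        ((if key = first then 1 else 0), [if key = first then 1 else 0])).2))]
  simp only [List.nil_append]
  apply List.map_congr_left
  intro k _
  have hlast : (if k = first then ([1] : List Int) else [0]).getLastD 0
      = (if k = first then (1 : Int) else 0) := by
    by_cases hkf : k = first <;> simp [hkf]
  have := per_key_fold rest k (if k = first then 1 else 0)
    (if k = first then ([1] : List Int) else [0]) hlast
  simp only [Function.comp_apply, this]
  congr 2
  by_cases hkf : k = first <;> simp [hkf]

-- ===== VERDICT (by name: the statement is the Claim_ definition above) =====
theorem get_all_ranks_spec : Claim_equal_get_all_ranks := by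
  intro bwt_ref letters _ hpre
  unfold Spec_get_all_ranks get_all_ranks get_all_ranks_alt
  cases hchars : bwt_ref.toList with
  | nil => cases hpre (by cases bwt_ref; simp_all)
  | cons c0 rest => exact main_eq _ c0 rest
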